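-- pv_equiv track=rewrite | github.com/BridgeQZH/jiahong_save_code | calculate_avg.py | find_winning_list_counts
-- ===== SOURCE A (Python) =====
-- def find_winning_list_counts(lists):
--     num_lists = len(lists)
--     list_length = len(lists[0])
--     counts = [0] * num_lists
--
--     for i in range(list_length):
--         max_value = float('-inf')
--         max_indices = []
--
--         for j in range(num_lists):
--             if lists[j][i] > max_value:
--                 max_value = lists[j][i]
--                 max_indices = [j]
--             elif lists[j][i] == max_value:
--                 max_indices.append(j)
--
--         for idx in max_indices:
--             counts[idx] += 1
--
--     return counts
-- ===== SOURCE B (Python) =====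
-- def find_winning_list_counts(lists):
--     n = len(lists[0])
--     maxima = [max(row[i] for row in lists) for i in range(n)]
--     return [sum(1 for i in range(n) if row[i] == maxima[i]) for row in lists]
-- ===== Notes on version B (the rewrite author's own statement) =====
-- stated objective: simpler
-- what changed: A keeps one stateful scan per column maintaining a running max and a rebuilt argmax list, then increments a mutable counts array; B first precomputes each column maximum once, then computes each list's count independently as the number of columns where it attains the precomputed maximum.
import Mathlib
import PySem

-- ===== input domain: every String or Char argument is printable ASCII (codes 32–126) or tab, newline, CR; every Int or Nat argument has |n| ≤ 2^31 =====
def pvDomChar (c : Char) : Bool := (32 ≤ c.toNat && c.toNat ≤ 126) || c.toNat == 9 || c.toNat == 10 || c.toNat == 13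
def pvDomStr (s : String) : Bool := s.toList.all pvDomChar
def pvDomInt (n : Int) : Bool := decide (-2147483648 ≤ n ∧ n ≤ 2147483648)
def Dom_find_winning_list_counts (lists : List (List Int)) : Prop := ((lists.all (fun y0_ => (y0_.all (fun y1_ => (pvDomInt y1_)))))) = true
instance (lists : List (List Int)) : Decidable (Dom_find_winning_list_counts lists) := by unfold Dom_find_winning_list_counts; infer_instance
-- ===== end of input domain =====

-- B replaces A's single stateful per-column scan (running max + rebuilt argmax list + mutable
-- counts array) by precomputing the column maxima once and then counting each list's wins
-- independently; objective: simpler decomposition, same asymptotic cost.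

-- ===== PORT A =====
-- inner j-loop body: running max (none = float('-inf')) and current argmax indices
def pvInnerA (lists : List (List Int)) (i : Nat) (st : Option Int × List Nat) (j : Nat) :
    Option Int × List Nat :=
  let v := (lists.getD j []).getD i 0
  match st.1 with
  | none => (some v, [j])                 -- any int is > float('-inf')
  | some m =>
    if m < v then (some v, [j])
    else if v = m then (st.1, st.2 ++ [j])
    else st

-- counts[idx] += 1
def pvBump (counts : List Int) (idx : Nat) : List Int :=
  counts.set idx (counts.getD idx 0 + 1)

-- body of the outer i-loop
def pvColStep (lists : List (List Int)) (counts : List Int) (i : Nat) : List Int :=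
  ((List.range lists.length).foldl (pvInnerA lists i) (none, [])).2.foldl pvBump counts

def find_winning_list_counts (lists : List (List Int)) : List Int :=
  (List.range (lists.getD 0 []).length).foldl (pvColStep lists)
    (List.replicate lists.length 0)

-- ===== PORT B =====
-- max(row[i] for row in lists)
def pvColMaxB (lists : List (List Int)) (i : Nat) : Int :=
  (lists.foldl
    (fun (acc : Option Int) row =>
      match acc with
      | none => some (row.getD i 0)
      | some m => some (max m (row.getD i 0))) none).getD 0

def find_winning_list_counts_alt (lists : List (List Int)) : List Int :=
  let n := (lists.getD 0 []).length
  let maxima := (List.range n).map (pvColMaxB lists)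
  lists.map (fun row =>
    (((List.range n).filter (fun i => decide (row.getD i 0 = maxima.getD i 0))).length : Int))

-- ===== PRECONDITION & SPEC =====
-- Pre_ excludes exactly the inputs on which Python A raises IndexError: the empty list of lists
-- (lists[0]) and ragged inputs where some list is shorter than lists[0].
def Pre_find_winning_list_counts (lists : List (List Int)) : Prop :=
  lists ≠ [] ∧ ∀ l ∈ lists, (lists.getD 0 []).length ≤ l.length
instance (lists : List (List Int)) : Decidable (Pre_find_winning_list_counts lists) := by
  unfold Pre_find_winning_list_counts; infer_instance
def pvWitness_find_winning_list_counts : List (List Int) := [[1, 2], [3, 2], [3, 1]]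

def Spec_find_winning_list_counts (lists : List (List Int)) (out : List Int) : Prop :=
  out = find_winning_list_counts_alt lists
instance (lists : List (List Int)) (out : List Int) :
    Decidable (Spec_find_winning_list_counts lists out) := by
  unfold Spec_find_winning_list_counts; infer_instance

-- ===== CLAIM (what is proved, stated in full; the proofs are below) =====
def Claim_equal_find_winning_list_counts : Prop :=
  ∀ (lists : List (List Int)), Dom_find_winning_list_counts lists →
    Pre_find_winning_list_counts lists →
    Spec_find_winning_list_counts lists (find_winning_list_counts lists)

-- ===== LEMMAS AND PROOFS =====

-- value of list j at column i
def pvV (lists : List (List Int)) (i j : Nat) : Int := (lists.getD j []).getD i 0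

-- maximum of column i over lists 0..m
def pvRunMax (lists : List (List Int)) (i : Nat) : Nat → Int
  | 0 => pvV lists i 0
  | m + 1 => max (pvRunMax lists i m) (pvV lists i (m + 1))

-- overall maximum of column i
def pvM (lists : List (List Int)) (i : Nat) : Int := pvRunMax lists i (lists.length - 1)

theorem pvV_le_runMax (lists : List (List Int)) (i : Nat) :
    ∀ m j, j ≤ m → pvV lists i j ≤ pvRunMax lists i m := by
  intro m
  induction m with
  | zero => intro j hj; interval_cases j; simp [pvRunMax]
  | succ m ih =>
    intro j hj
    rcases Nat.lt_or_ge j (m+1) with h | h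
    · exact le_trans (ih j (Nat.lt_succ_iff.mp h)) (le_max_left _ _)
    · have : j = m + 1 := le_antisymm hj h
      subst this
      exact le_max_right _ _

theorem pvInnerA_some (lists : List (List Int)) (i : Nat) (m : Int) (l : List Nat) (j : Nat) :
    pvInnerA lists i (some m, l) j =
      if m < pvV lists i j then (some (pvV lists i j), [j])
      else if pvV lists i j = m then (some m, l ++ [j]) else (some m, l) := rfl

theorem inner_eq (lists : List (List Int)) (i : Nat) :
    ∀ m, (List.range (m + 1)).foldl (pvInnerA lists i) (none, []) =
      (some (pvRunMax lists i m),
        (List.range (m + 1)).filter (fun j => decide (pvV lists i j = pvRunMax lists i m))) := by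
  intro m
  induction m with
  | zero => simp [List.range_succ, pvInnerA, pvRunMax, pvV]
  | succ m ih =>
    rw [show List.range (m+1+1) = List.range (m+1) ++ [m+1] from List.range_succ,
      List.foldl_append, ih]
    simp only [List.foldl_cons, List.foldl_nil, pvInnerA_some, List.filter_append]
    rcases lt_trichotomy (pvRunMax lists i m) (pvV lists i (m+1)) with h | h | h
    · have hmax : pvRunMax lists i (m+1) = pvV lists i (m+1) := by
        simp [pvRunMax, max_eq_right h.le]
      rw [if_pos h, hmax]
      have h1 : (List.range (m + 1)).filter (fun j => decide (pvV lists i j = pvV lists i (m+1))) = [] := by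
        rw [List.filter_eq_nil_iff]
        intro j hj
        have := pvV_le_runMax lists i m j (Nat.lt_succ_iff.mp (List.mem_range.mp hj))
        simp only [decide_eq_true_eq]; omega
      rw [h1]
      simp
    · have hmax : pvRunMax lists i (m+1) = pvRunMax lists i m := by
        simp [pvRunMax, max_eq_left h.ge]
      rw [if_neg (by omega), if_pos h.symm, hmax]
      simp [h.symm]
    · have hmax : pvRunMax lists i (m+1) = pvRunMax lists i m := by
        simp [pvRunMax, max_eq_left h.le]
      rw [if_neg (by omega), if_neg h.ne, hmax]
      simp [h.ne]

theorem bump_length : ∀ (l : List Nat) (counts : List Int),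
    (l.foldl pvBump counts).length = counts.length := by
  intro l
  induction l with
  | nil => intro counts; rfl
  | cons a l ih => intro counts; simp [List.foldl_cons, ih, pvBump]

theorem bump_getD : ∀ (l : List Nat) (counts : List Int) (j : Nat), j < counts.length →
    (l.foldl pvBump counts).getD j 0 = counts.getD j 0 + (l.count j : Int) := by
  intro l
  induction l with
  | nil => intro counts j hj; simp
  | cons a l ih =>
    intro counts j hj
    rw [List.foldl_cons, ih _ j (by simp [pvBump, hj])]
    have hstep : (pvBump counts a).getD j 0 = counts.getD j 0 + (if a = j then 1 else 0) := by
      by_cases haj : a = j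
      · subst haj
        simp [pvBump, List.getD, hj]
      · simp [pvBump, List.getD, List.getElem?_set_ne haj, haj]
    rw [hstep, List.count_cons]
    by_cases haj : a = j
    · simp [haj]; ring
    · simp [haj]

theorem count_filter_range (N j : Nat) (p : Nat → Bool) (hj : j < N) :
    ((List.range N).filter p).count j = if p j then 1 else 0 := by
  by_cases hp : p j
  · rw [if_pos hp]
    exact List.count_eq_one_of_mem ((List.nodup_range).filter p)
      (List.mem_filter.mpr ⟨List.mem_range.mpr hj, hp⟩)
  · rw [if_neg hp, List.count_eq_zero]
    intro hmem
    exact hp (List.mem_filter.mp hmem).2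

theorem outer (lists : List (List Int)) (hne : lists ≠ []) : ∀ n : Nat,
    ((List.range n).foldl (pvColStep lists) (List.replicate lists.length 0)).length
        = lists.length ∧
      ∀ j < lists.length,
        ((List.range n).foldl (pvColStep lists) (List.replicate lists.length 0)).getD j 0 =
          (((List.range n).filter (fun i => decide (pvV lists i j = pvM lists i))).length : Int) := by
  have hN : lists.length - 1 + 1 = lists.length := by
    have : lists.length ≠ 0 := by simpa [List.length_eq_zero_iff] using hne
    omega
  intro n
  induction n with
  | zero => simp
  | succ n ih =>
    rw [show List.range (n+1) = List.range n ++ [n] from List.range_succ, List.foldl_append]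
    simp only [List.foldl_cons, List.foldl_nil]
    set r := (List.range n).foldl (pvColStep lists) (List.replicate lists.length 0) with hr
    have hcs : pvColStep lists r n =
        ((List.range lists.length).filter
          (fun j => decide (pvV lists n j = pvM lists n))).foldl pvBump r := by
      unfold pvColStep
      rw [← hN, inner_eq]
      rw [hN]
      rfl
    constructor
    · rw [hcs, bump_length, ih.1]
    · intro j hj
      rw [hcs, bump_getD _ r j (by rw [ih.1]; exact hj), ih.2 j hj,
        count_filter_range lists.length j _ hj]
      rw [List.filter_append]
      simp only [List.length_append, List.filter_cons, List.filter_nil]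
      by_cases hp : pvV lists n j = pvM lists n <;> simp [hp]

theorem runMax_congr (i : Nat) :
    ∀ (m : Nat) (L1 L2 : List (List Int)), (∀ j ≤ m, pvV L1 i j = pvV L2 i j) →
      pvRunMax L1 i m = pvRunMax L2 i m := by
  intro m
  induction m with
  | zero => intro L1 L2 h; simpa [pvRunMax] using h 0 le_rfl
  | succ m ih =>
    intro L1 L2 h
    simp only [pvRunMax]
    rw [ih L1 L2 (fun j hj => h j (le_trans hj (Nat.le_succ m))), h (m+1) le_rfl]

theorem optfold (i : Nat) :
    ∀ (xs : List (List Int)) (m : Int),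
      xs.foldl
        (fun (acc : Option Int) row =>
          match acc with
          | none => some (row.getD i 0)
          | some m => some (max m (row.getD i 0))) (some m)
      = some (xs.foldl (fun m row => max m (row.getD i 0)) m) := by
  intro xs
  induction xs with
  | nil => intro m; rfl
  | cons a xs ih => intro m; simp only [List.foldl_cons]; exact ih _

theorem maxfold (i : Nat) (x : List Int) :
    ∀ (xs : List (List Int)),
      xs.foldl (fun m row => max m (row.getD i 0)) (x.getD i 0)
        = pvRunMax (x :: xs) i xs.length := by
  intro xs
  induction xs using List.reverseRecOn with
  | nil => simp [pvRunMax, pvV]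
  | append_singleton ys y ih =>
    rw [List.foldl_append, List.foldl_cons, List.foldl_nil, ih]
    have hlen : (ys ++ [y]).length = ys.length + 1 := by simp
    rw [hlen]
    simp only [pvRunMax]
    have h1 : pvRunMax (x :: (ys ++ [y])) i ys.length = pvRunMax (x :: ys) i ys.length := by
      apply runMax_congr
      intro j hj
      unfold pvV
      rw [show x :: (ys ++ [y]) = (x :: ys) ++ [y] from rfl,
        List.getD_append _ _ _ _ (by simp; omega)]
    have h2 : pvV (x :: (ys ++ [y])) i (ys.length + 1) = y.getD i 0 := by
      unfold pvV
      rw [show x :: (ys ++ [y]) = (x :: ys) ++ [y] from rfl]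
      rw [List.getD_append_right _ _ _ _ (by simp)]
      simp
    rw [h1, h2]

theorem colMaxB_eq (lists : List (List Int)) (hne : lists ≠ []) (i : Nat) :
    pvColMaxB lists i = pvM lists i := by
  obtain ⟨x, xs, rfl⟩ := List.exists_cons_of_ne_nil hne
  unfold pvColMaxB pvM
  rw [List.foldl_cons]
  simp only [optfold i xs (x.getD i 0), Option.getD_some]
  rw [maxfold]
  simp

-- ===== VERDICT (by name: the statement is the Claim_ definition above) =====
theorem find_winning_list_counts_spec : Claim_equal_find_winning_list_counts := by
  intro lists _ hpre
  obtain ⟨hne, -⟩ := hpre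
  unfold Spec_find_winning_list_counts find_winning_list_counts find_winning_list_counts_alt
  have hA := outer lists hne (lists.getD 0 []).length
  apply List.ext_getElem
  · simpa using hA.1
  · intro k h1 h2
    have hk : k < lists.length := by rw [hA.1] at h1; exact h1
    rw [(List.getD_eq_getElem _ 0 h1).symm, hA.2 k hk]
    simp only [List.getElem_map]
    refine congrArg (fun l => ((List.length l : Int))) (List.filter_congr ?_)
    intro i hi
    have hiN : i < (lists.getD 0 []).length := List.mem_range.mp hi
    have hrow : lists[k].getD i 0 = pvV lists i k := by
      unfold pvV
      rw [List.getD_eq_getElem lists [] hk]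
    have hmx : ((List.range (lists.getD 0 []).length).map (pvColMaxB lists)).getD i 0
        = pvM lists i := by
      rw [List.getD_eq_getElem _ _ (by simpa using hiN)]
      simp [colMaxB_eq lists hne i]
    rw [hrow, hmx]
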